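-- pv_equiv track=rewrite | github.com/anuroop18/extract_keywords | extract_keywords/core.py | remove_singular_words
-- ===== SOURCE A (Python) =====
-- def remove_singular_words(word_list:list): # List of words
--     "Removes singular words when they have a corresponding plural word in a list of words."
--     plural_words = set()
--     singular_words = []
--
--     for word in word_list:
--         # Check if the word is in plural form by adding 's'
--         plural_form = word + 's'
--
--         if plural_form in word_list:
--             # If the plural form is in the list, add it to the set of plural words
--             plural_words.add(plural_form)
--         else:
--             # If the word is not in plural form, add it to the list of singular words
--             singular_words.append(word)
--
--     return singular_words
-- ===== SOURCE B (Python) =====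
-- def remove_singular_words(word_list: list):
--     "Removes singular words when they have a corresponding plural word in a list of words."
--     # One pass builds the removal index: stems of every plural-looking word.
--     to_remove = set()
--     for word in word_list:
--         if word.endswith('s'):
--             to_remove.add(word[:-1])
--     # Second pass filters, preserving order and duplicates.
--     return [word for word in word_list if word not in to_remove]
-- ===== Notes on version B (the rewrite author's own statement) =====
-- stated objective: faster
-- what changed: Instead of testing word+'s' against the whole list for every word (quadratic membership scans), B builds in one pass a set of stems of the words that end in 's' and then filters the list against that set.
import Mathlib
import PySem

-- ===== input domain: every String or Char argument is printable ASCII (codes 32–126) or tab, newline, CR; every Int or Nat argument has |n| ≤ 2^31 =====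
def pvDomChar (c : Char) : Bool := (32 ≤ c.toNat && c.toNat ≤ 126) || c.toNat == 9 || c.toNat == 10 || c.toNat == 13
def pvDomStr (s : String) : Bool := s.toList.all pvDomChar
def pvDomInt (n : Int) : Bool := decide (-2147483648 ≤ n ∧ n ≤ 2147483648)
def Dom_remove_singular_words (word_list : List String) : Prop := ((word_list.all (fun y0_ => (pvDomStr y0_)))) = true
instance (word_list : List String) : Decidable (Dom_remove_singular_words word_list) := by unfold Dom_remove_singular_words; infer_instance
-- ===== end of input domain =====

-- B replaces A's per-word quadratic membership scan of the whole list by a one-pass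
-- removal index (the set of stems of the words ending in 's') plus a separate filter pass.


-- ===== PORT A =====
def remove_singular_words (word_list : List String) : List String :=
  (word_list.foldl
    (fun (st : PySem.Set String × List String) word =>
      let plural_form := String.ofList (word.toList ++ ['s'])
      if word_list.contains plural_form then
        (PySem.Set.add st.1 plural_form, st.2)
      else
        (st.1, st.2 ++ [word]))
    (PySem.Set.empty, [])).2

-- ===== PORT B =====
def remove_singular_words_alt (word_list : List String) : List String :=
  let to_remove : PySem.Set String :=
    word_list.foldl
      (fun s word =>
        if PySem.Str.endswith word "s" then
          PySem.Set.add s (PySem.Str.slice word none (some (-1)))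
        else s)
      PySem.Set.empty
  word_list.filter (fun word => !(PySem.Set.contains to_remove word))

-- ===== PRECONDITION & SPEC =====
def Spec_remove_singular_words (word_list : List String) (out : List String) : Prop := out = remove_singular_words_alt word_list
instance (word_list : List String) (out : List String) : Decidable (Spec_remove_singular_words word_list out) := by unfold Spec_remove_singular_words; infer_instance

-- ===== CLAIM (what is proved, stated in full; the proofs are below) =====
def Claim_equal_remove_singular_words : Prop := ∀ (word_list : List String), Dom_remove_singular_words word_list → Spec_remove_singular_words word_list (remove_singular_words word_list)

-- ===== LEMMAS AND PROOFS =====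

-- A's loop keeps in its second component exactly the words whose plural form is absent from the list.
theorem rsw_foldA (L : List String) (l : List String) (s : PySem.Set String) (acc : List String) :
    (l.foldl
      (fun (st : PySem.Set String × List String) word =>
        let plural_form := String.ofList (word.toList ++ ['s'])
        if L.contains plural_form then
          (PySem.Set.add st.1 plural_form, st.2)
        else
          (st.1, st.2 ++ [word]))
      (s, acc)).2
    = acc ++ l.filter (fun w => !(L.contains (String.ofList (w.toList ++ ['s'])))) := by
  induction l generalizing s acc with
  | nil => simp
  | cons w l ih =>
    rw [List.foldl_cons, List.filter_cons]
    by_cases h : L.contains (String.ofList (w.toList ++ ['s'])) = true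
    · rw [if_pos h]
      have hb : (!L.contains (String.ofList (w.toList ++ ['s']))) = false := by
        rw [h]; rfl
      rw [hb]
      simp only [Bool.false_eq_true, if_false]
      exact ih _ _
    · rw [if_neg h]
      have hb : (!L.contains (String.ofList (w.toList ++ ['s']))) = true := by
        simp only [Bool.not_eq_true] at h; rw [h]; rfl
      rw [hb, if_pos rfl, ih]
      simp
/-- Membership in B's removal set: the stems of the words of l that end in 's'. -/
theorem rsw_foldB (l : List String) (s : PySem.Set String) (y : String) :
    (y ∈ l.foldl
      (fun s word =>
        if PySem.Str.endswith word "s" then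
          PySem.Set.add s (PySem.Str.slice word none (some (-1)))
        else s) s)
    ↔ y ∈ s ∨ ∃ w ∈ l, PySem.Str.endswith w "s" = true ∧ y = PySem.Str.slice w none (some (-1)) := by
  induction l generalizing s with
  | nil => simp
  | cons w l ih =>
    rw [List.foldl_cons, List.exists_mem_cons_iff]
    by_cases h : PySem.Str.endswith w "s" = true
    · rw [if_pos h, ih, PySem.Set.mem_add]
      simp only [h, true_and]
      tauto
    · rw [if_neg h, ih]
      simp only [Bool.not_eq_true] at h
      simp only [h, Bool.false_eq_true, false_and, false_or]

-- The stem set contains w exactly when w ++ "s" is in the list.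
theorem rsw_key (L : List String) (w : String) :
    (∃ v ∈ L, PySem.Str.endswith v "s" = true ∧ w = PySem.Str.slice v none (some (-1)))
    ↔ String.ofList (w.toList ++ ['s']) ∈ L := by
  constructor
  · rintro ⟨v, hv, hes, rfl⟩
    have h1 : ('s' :: []) <:+ v.toList := by
      rw [PySem.Str.endswith_eq] at hes
      exact (PySem.Chars.endswith_iff _ _).mp (by simpa using hes)
    obtain ⟨pre, hpre⟩ := h1
    have h2 : (PySem.Str.slice v none (some (-1))).toList = v.toList.dropLast :=
      PySem.Str.slice_to_neg_one v
    have h3 : v.toList.dropLast ++ ['s'] = v.toList := by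
      rw [← hpre]; simp
    have h4 : String.ofList ((PySem.Str.slice v none (some (-1))).toList ++ ['s']) = v := by
      rw [h2, h3, String.ofList_toList]
    rw [h4]; exact hv
  · intro hmem
    refine ⟨String.ofList (w.toList ++ ['s']), hmem, ?_, ?_⟩
    · rw [PySem.Str.endswith_eq, String.toList_ofList]
      have hs : ("s" : String).toList = ['s'] := by simp
      rw [hs]
      exact (PySem.Chars.endswith_iff _ _).mpr ⟨w.toList, rfl⟩
    · apply String.toList_inj.mp
      rw [PySem.Str.slice_to_neg_one, String.toList_ofList]
      simp

theorem rsw_main (word_list : List String) :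
    remove_singular_words word_list = remove_singular_words_alt word_list := by
  rw [remove_singular_words]
  rw [rsw_foldA word_list word_list PySem.Set.empty []]
  rw [List.nil_append]
  simp only [remove_singular_words_alt]
  apply List.filter_congr
  intro w hw
  have hB := rsw_foldB word_list PySem.Set.empty w
  have hk := rsw_key word_list w
  have hc : word_list.contains (String.ofList (w.toList ++ ['s']))
      = PySem.Set.contains
          (word_list.foldl
            (fun s word =>
              if PySem.Str.endswith word "s" then
                PySem.Set.add s (PySem.Str.slice word none (some (-1)))
              else s)
            PySem.Set.empty) w := by
    apply Bool.coe_iff_coe.mp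
    rw [List.contains_iff_mem, PySem.Set.contains_iff, hB, ← hk]
    simp only [PySem.Set.empty, List.not_mem_nil, false_or]
  rw [hc]

-- ===== VERDICT (by name: the statement is the Claim_ definition above) =====
theorem remove_singular_words_spec : Claim_equal_remove_singular_words := by
  intro word_list _
  unfold Spec_remove_singular_words
  exact rsw_main word_list
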